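-- pv_equiv track=rewrite | github.com/stefanwebb/coding-challenge-preparation | coderbyte/easy/closest-enemy.py | ClosestEnemy
-- ===== SOURCE A (Python) =====
-- def ClosestEnemy(arr):
--     whereOne = arr.index(1)
--
--     right = whereOne+1
--     left = whereOne-1
--
--     while True:
--         if right < len(arr) and arr[right] == 2:
--             whereTwo = right
--             break
--         elif left >= 0 and arr[left] == 2:
--             whereTwo = left
--             break
--         right += 1
--         left -= 1
--
--         if right >= len(arr) and left < 0:
--             return 0
--
--     # code goes here
--     return abs(whereTwo-whereOne)
-- ===== SOURCE B (Python) =====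
-- def ClosestEnemy(arr):
--     whereOne = arr.index(1)
--     dists = [abs(i - whereOne) for i, x in enumerate(arr) if x == 2]
--     return min(dists) if dists else 0
-- ===== Notes on version B (the rewrite author's own statement) =====
-- stated objective: simpler
-- what changed: Replaces the symmetric outward-expanding while-loop with early break by a single pass over enumerate(arr) collecting |i - index(1)| for every 2, returning the minimum (or 0 if no 2).
import Mathlib
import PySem

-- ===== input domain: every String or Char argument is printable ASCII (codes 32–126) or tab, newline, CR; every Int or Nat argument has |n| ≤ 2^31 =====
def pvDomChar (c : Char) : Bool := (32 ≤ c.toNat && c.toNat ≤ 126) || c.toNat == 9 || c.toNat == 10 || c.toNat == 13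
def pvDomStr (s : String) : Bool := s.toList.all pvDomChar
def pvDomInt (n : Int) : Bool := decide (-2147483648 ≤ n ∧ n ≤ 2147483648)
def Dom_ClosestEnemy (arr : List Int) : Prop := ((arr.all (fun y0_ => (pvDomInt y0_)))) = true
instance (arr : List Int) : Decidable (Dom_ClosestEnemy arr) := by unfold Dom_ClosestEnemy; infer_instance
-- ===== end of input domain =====

-- B replaces A's outward-expanding two-pointer search by one pass minimizing |i - index(1)| over all 2s (simpler decomposition, same cost).

-- ===== PORT A =====
-- the `while True` loop of A; `right`/`left` move outward one step per iteration
def ClosestEnemyLoop (arr : List Int) (w right left : Int) : Int :=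
  if right < (arr.length : Int) ∧ PySem.List.pyGet? arr right = some 2 then
    |right - w|
  else if 0 ≤ left ∧ PySem.List.pyGet? arr left = some 2 then
    |left - w|
  else if (arr.length : Int) ≤ right + 1 ∧ left - 1 < 0 then
    0
  else
    ClosestEnemyLoop arr w (right + 1) (left - 1)
termination_by (((arr.length : Int) - right).toNat + (left + 1).toNat)
decreasing_by omega

def ClosestEnemy (arr : List Int) : Int :=
  match PySem.List.index? arr 1 with
  | none => 0  -- Python raises ValueError here; excluded by Pre_ClosestEnemy
  | some w => ClosestEnemyLoop arr (w : Int) ((w : Int) + 1) ((w : Int) - 1)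

-- ===== PORT B =====
def ClosestEnemy_alt (arr : List Int) : Int :=
  match PySem.List.index? arr 1 with
  | none => 0  -- Python raises ValueError here; excluded by Pre_ClosestEnemy
  | some w =>
    let dists := (PySem.List.enumerate arr).filterMap
      (fun p => if p.2 == 2 then some |p.1 - (w : Int)| else none)
    match PySem.List.min? dists (fun y => y) with
    | some m => m
    | none => 0

-- ===== PRECONDITION & SPEC =====
-- Pre_ excludes arrays not containing 1, on which A (and B) raise ValueError from arr.index(1)
def Pre_ClosestEnemy (arr : List Int) : Prop := (1 : Int) ∈ arr
instance (arr : List Int) : Decidable (Pre_ClosestEnemy arr) := by unfold Pre_ClosestEnemy; infer_instance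
def pvWitness_ClosestEnemy : List Int := [0, 1, 0, 2]

def Spec_ClosestEnemy (arr : List Int) (out : Int) : Prop := out = ClosestEnemy_alt arr
instance (arr : List Int) (out : Int) : Decidable (Spec_ClosestEnemy arr out) := by unfold Spec_ClosestEnemy; infer_instance

-- ===== CLAIM (what is proved, stated in full; the proofs are below) =====
def Claim_equal_ClosestEnemy : Prop := ∀ (arr : List Int), Dom_ClosestEnemy arr → Pre_ClosestEnemy arr → Spec_ClosestEnemy arr (ClosestEnemy arr)

-- ===== LEMMAS AND PROOFS =====

-- the value B's pass computes once the index of 1 is known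
def altBody (arr : List Int) (w : Nat) : Int :=
  match PySem.List.min?
      ((PySem.List.enumerate arr).filterMap
        (fun p => if p.2 == 2 then some |p.1 - (w : Int)| else none))
      (fun y => y) with
  | some m => m
  | none => 0

lemma mem_dists_iff (arr : List Int) (w : Nat) (m : Int) :
    m ∈ (PySem.List.enumerate arr).filterMap
        (fun p => if p.2 == 2 then some |p.1 - (w : Int)| else none)
      ↔ ∃ (j : Nat) (hj : j < arr.length), arr[j] = 2 ∧ |(j : Int) - (w : Int)| = m := by
  simp only [List.mem_filterMap, PySem.List.mem_enumerate_iff]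
  constructor
  · rintro ⟨⟨i, x⟩, ⟨k, hk, hp⟩, hf⟩
    cases hp
    by_cases h2 : arr[k] = 2
    · refine ⟨k, hk, h2, ?_⟩
      simp [h2] at hf
      simpa using hf
    · simp [h2] at hf
  · rintro ⟨j, hj, h2, hm⟩
    exact ⟨((j : Int), arr[j]), ⟨j, hj, by simp⟩, by simp [h2, hm]⟩

lemma altBody_eq_of_hit (arr : List Int) (w k : Nat)
    (hmem : ∃ (j : Nat) (hj : j < arr.length), arr[j] = 2 ∧ |(j : Int) - (w : Int)| = (k : Int))
    (hmin : ∀ (j : Nat) (hj : j < arr.length), arr[j] = 2 → (k : Int) ≤ |(j : Int) - (w : Int)|) :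
    altBody arr w = (k : Int) := by
  unfold altBody
  set ds := (PySem.List.enumerate arr).filterMap
      (fun p => if p.2 == 2 then some |p.1 - (w : Int)| else none) with hds
  have hk : (k : Int) ∈ ds := (mem_dists_iff arr w _).2 hmem
  rcases hm : PySem.List.min? ds (fun y => y) with _ | m
  · exact absurd ((PySem.List.min?_eq_none_iff ds (fun y => y)).1 hm ▸ hk) (List.not_mem_nil)
  · have hmm := PySem.List.min?_mem hm
    have hle : ∀ y ∈ ds, m ≤ y := PySem.List.min?_isMin hm
    obtain ⟨j, hj, h2, hjm⟩ := (mem_dists_iff arr w m).1 hmm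
    have h1 : (k : Int) ≤ m := hjm ▸ hmin j hj h2
    exact le_antisymm (hle _ hk) h1

lemma altBody_eq_zero (arr : List Int) (w : Nat)
    (hno : ∀ (j : Nat) (hj : j < arr.length), arr[j] ≠ 2) :
    altBody arr w = 0 := by
  unfold altBody
  rcases hm : PySem.List.min?
      ((PySem.List.enumerate arr).filterMap
        (fun p => if p.2 == 2 then some |p.1 - (w : Int)| else none)) (fun y => y) with _ | m
  · rw [hm]
  · obtain ⟨j, hj, h2, _⟩ := (mem_dists_iff arr w m).1 (PySem.List.min?_mem hm)
    exact absurd h2 (hno j hj)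

lemma pyGet?_eq_two (arr : List Int) (i : Int) (n : Nat) (hi : i = (n : Int))
    (hn : n < arr.length) :
    (PySem.List.pyGet? arr i = some 2) ↔ arr[n] = 2 := by
  subst hi
  rw [PySem.List.pyGet?_natCast]
  simp [List.getElem?_eq_getElem hn]

lemma loop_eq (arr : List Int) (w : Nat) (hw : w < arr.length) :
    ∀ (n k : Nat), (arr.length - (w + k)) + (w + 1 - k) ≤ n → 1 ≤ k →
    (∀ (j : Nat) (hj : j < arr.length), arr[j] = 2 → (k : Int) ≤ |(j : Int) - (w : Int)|) →
    ClosestEnemyLoop arr (w : Int) ((w : Int) + (k : Int)) ((w : Int) - (k : Int)) = altBody arr w := by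
  intro n
  induction n using Nat.strong_induction_on with
  | _ n IH =>
    intro k hn hk H
    rw [ClosestEnemyLoop]
    by_cases hr : (w : Int) + (k : Int) < (arr.length : Int) ∧
        PySem.List.pyGet? arr ((w : Int) + (k : Int)) = some 2
    · -- right hit at distance k
      rw [if_pos hr]
      have h2 : arr[w + k]'(by omega) = 2 :=
        (pyGet?_eq_two arr _ (w + k) (by push_cast; ring) (by omega)).1 hr.2
      have habs : |(w : Int) + (k : Int) - (w : Int)| = (k : Int) := by
        rw [abs_of_nonneg] <;> omega
      rw [habs, altBody_eq_of_hit arr w k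
        ⟨w + k, by omega, h2, by rw [abs_of_nonneg] <;> push_cast <;> omega⟩ H]
    · rw [if_neg hr]
      by_cases hl : 0 ≤ (w : Int) - (k : Int) ∧
          PySem.List.pyGet? arr ((w : Int) - (k : Int)) = some 2
      · -- left hit at distance k
        rw [if_pos hl]
        have h2 : arr[w - k]'(by omega) = 2 :=
          (pyGet?_eq_two arr _ (w - k) (by have := hl.1; omega) (by omega)).1 hl.2
        have habs : |(w : Int) - (k : Int) - (w : Int)| = (k : Int) := by
          rw [abs_of_nonpos] <;> omega
        rw [habs, altBody_eq_of_hit arr w k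
          ⟨w - k, by omega, h2, by rw [abs_of_nonpos] <;> omega⟩ H]
      · rw [if_neg hl]
        -- no 2 at distance exactly k
        have hnok : ∀ (j : Nat) (hj : j < arr.length), arr[j] = 2 →
            (k : Int) < |(j : Int) - (w : Int)| := by
          intro j hj h2
          rcases lt_or_eq_of_le (H j hj h2) with h | h
          · exact h
          · exfalso
            have hcase : (j : Int) = (w : Int) + (k : Int) ∨ (j : Int) = (w : Int) - (k : Int) := by
              rcases abs_cases ((j : Int) - (w : Int)) with ⟨ha, _⟩ | ⟨ha, _⟩ <;> omega
            have hget : PySem.List.pyGet? arr ((j : Nat) : Int) = some 2 :=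
              (pyGet?_eq_two arr _ j rfl hj).2 h2
            rcases hcase with hje | hje
            · exact hr ⟨by omega, by rw [← hje]; exact hget⟩
            · exact hl ⟨by omega, by rw [← hje]; exact hget⟩
        by_cases hstop : (arr.length : Int) ≤ (w : Int) + (k : Int) + 1 ∧
            (w : Int) - (k : Int) - 1 < 0
        · rw [if_pos hstop]
          obtain ⟨hs1, hs2⟩ := hstop
          refine (altBody_eq_zero arr w ?_).symm
          intro j hj h2
          have := hnok j hj h2
          have hjl : (j : Int) < (arr.length : Int) := by exact_mod_cast hj
          rcases abs_cases ((j : Int) - (w : Int)) with ⟨ha, _⟩ | ⟨ha, _⟩ <;> omega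
        · rw [if_neg hstop]
          have hst : ((w : Int) + (k : Int) + 1 < (arr.length : Int)) ∨
              ((0 : Int) ≤ (w : Int) - (k : Int) - 1) := by
            rcases not_and_or.mp hstop with h | h
            · exact Or.inl (by omega)
            · exact Or.inr (by omega)
          have e1 : (w : Int) + (k : Int) + 1 = (w : Int) + ((k + 1 : Nat) : Int) := by
            push_cast; ring
          have e2 : (w : Int) - (k : Int) - 1 = (w : Int) - ((k + 1 : Nat) : Int) := by
            push_cast; ring
          rw [e1, e2]
          exact IH ((arr.length - (w + (k + 1))) + (w + 1 - (k + 1))) (by omega) (k + 1)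
            (le_refl _) (by omega) (by
            intro j hj h2
            have := hnok j hj h2
            push_cast
            omega)

-- ===== VERDICT (by name: the statement is the Claim_ definition above) =====
theorem ClosestEnemy_spec : Claim_equal_ClosestEnemy := by
  intro arr _ hpre
  unfold Pre_ClosestEnemy at hpre
  unfold Spec_ClosestEnemy
  rcases hi : PySem.List.index? arr 1 with _ | w
  · exact absurd hpre ((PySem.List.index?_eq_none_iff arr 1).1 hi)
  · obtain ⟨hwlt, hw1, _⟩ := PySem.List.getElem_of_index?_eq_some hi
    have hA : ClosestEnemy arr = ClosestEnemyLoop arr (w : Int) ((w : Int) + 1) ((w : Int) - 1) := by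
      unfold ClosestEnemy; rw [hi]
    have hB : ClosestEnemy_alt arr = altBody arr w := by
      unfold ClosestEnemy_alt altBody; rw [hi]
    have H1 : ∀ (j : Nat) (hj : j < arr.length), arr[j] = 2 →
        ((1 : Nat) : Int) ≤ |(j : Int) - (w : Int)| := by
      intro j hj h2
      have hjw : j ≠ w := fun h => by
        have : (1 : Int) = 2 := hw1.symm.trans ((h ▸ h2 : arr[w]'(h ▸ hj) = 2))
        exact absurd this (by decide)
      have hne : (j : Int) ≠ (w : Int) := by exact_mod_cast hjw
      rcases abs_cases ((j : Int) - (w : Int)) with ⟨ha, _⟩ | ⟨ha, _⟩ <;> omega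
    have hloop := loop_eq arr w hwlt ((arr.length - (w + 1)) + (w + 1 - 1)) 1 (le_refl _) (le_refl 1) H1
    simp only [Nat.cast_one] at hloop
    rw [hA, hB, hloop]
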